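-- pv_equiv track=rewrite | github.com/Arsen1302/Code-copy-detector | TestData/solutions/problem_842_3.py | solution_842_3
-- ===== SOURCE A (Python) =====
-- from typing import List
--
-- def solution_842_3(new: List[List[int]]) -> int:
--     arr=[]
--     for i in range(len(new)):
--         for j in range(len(new)):
--             if i!=j and new[j][0] <= new[i][0] and new[i][1] <= new[j][1]:
--                 arr.append(new[i])
--                 break
--     return len(new)-len(arr)
-- ===== SOURCE B (Python) =====
-- def solution_842_3(new):
--     cnt = {}
--     for x in new:
--         p = (x[0], x[1])
--         cnt[p] = cnt.get(p, 0) + 1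
--     keys = sorted(cnt, key=lambda p: (p[0], -p[1]))
--     uncovered = 0
--     maxend = None
--     for a, b in keys:
--         if cnt[(a, b)] == 1 and (maxend is None or maxend < b):
--             uncovered += 1
--         if maxend is None or b > maxend:
--             maxend = b
--     return uncovered
-- ===== Notes on version B (the rewrite author's own statement) =====
-- stated objective: alternative
-- what changed: A's all-pairs scan (for each interval, search for another containing it, quadratic in the worst case) is replaced by counting duplicate (start,end) pairs in a dict and one sweep over the distinct pairs sorted by (start asc, end desc) tracking the running maximum end; an interval is uncovered iff its pair is unique and no earlier pair in that order has end >= its end.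
-- outside the precondition, e.g. on solution_842_3([[5]]): A returns 1, B raises IndexError; on solution_842_3([[0, 10], [0, 10], [-1]]): A returns 1, B raises IndexError
import Mathlib
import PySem

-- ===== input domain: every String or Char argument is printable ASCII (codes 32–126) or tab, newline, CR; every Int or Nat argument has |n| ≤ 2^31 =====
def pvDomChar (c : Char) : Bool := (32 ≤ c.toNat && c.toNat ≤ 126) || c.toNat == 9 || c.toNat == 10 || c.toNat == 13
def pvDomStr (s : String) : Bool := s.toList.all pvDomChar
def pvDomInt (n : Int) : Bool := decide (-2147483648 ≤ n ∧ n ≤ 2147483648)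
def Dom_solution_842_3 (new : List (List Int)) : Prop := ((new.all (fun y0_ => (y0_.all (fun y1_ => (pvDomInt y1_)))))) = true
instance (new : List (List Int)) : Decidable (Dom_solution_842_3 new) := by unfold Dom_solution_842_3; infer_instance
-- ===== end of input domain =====

-- B replaces A's all-pairs containment scan by counting duplicate (start,end) pairs in a dict
-- and a single sweep over the distinct pairs sorted by (start asc, end desc), tracking the
-- maximum end seen so far (objective: alternative algorithm; not measurably faster on the
-- timed inputs, where A's inner break fires early).

-- ===== PORT A =====
def solution_842_3 (new : List (List Int)) : Int :=
  let n : Int := new.length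
  let arr : List (List Int) :=
    (PySem.List.pyRange 0 n 1).foldl
      (fun arr i =>
        if (PySem.List.pyRange 0 n 1).any (fun j =>
              decide (j ≠ i) &&
              decide (PySem.List.pyGetD (PySem.List.pyGetD new j []) 0 0 ≤
                      PySem.List.pyGetD (PySem.List.pyGetD new i []) 0 0) &&
              decide (PySem.List.pyGetD (PySem.List.pyGetD new i []) 1 0 ≤
                      PySem.List.pyGetD (PySem.List.pyGetD new j []) 1 0))
        then arr ++ [PySem.List.pyGetD new i []] else arr) []
  n - arr.length

-- ===== PORT B =====
-- loop body of B's sweep over the sorted distinct pairs (state: (uncovered, maxend))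
def pvStep (cnt : PySem.Dict (Int × Int) Int) (st : Int × Option Int) (p : Int × Int) : Int × Option Int :=
  ((if (cnt.getD p 0 == 1) &&
        (match st.2 with | none => true | some m => decide (m < p.2)) then st.1 + 1 else st.1),
   (match st.2 with | none => some p.2 | some m => if m < p.2 then some p.2 else some m))

def solution_842_3_alt (new : List (List Int)) : Int :=
  let cnt : PySem.Dict (Int × Int) Int :=
    new.foldl (fun d x =>
      let p := (PySem.List.pyGetD x 0 0, PySem.List.pyGetD x 1 0)
      d.insert p (d.getD p 0 + 1)) PySem.Dict.empty
  let keys := PySem.List.sorted2 cnt.keys (fun p => p.1) (fun p => -p.2) false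
  (keys.foldl (pvStep cnt) (0, none)).1

-- ===== PRECONDITION & SPEC =====
-- Pre_ excludes inputs containing an inner list of fewer than two elements: there A usually
-- raises IndexError, and in the remaining corner cases returns only because its break/short-circuit
-- order happens never to index the short list; B always reads both endpoints and raises there.
def Pre_solution_842_3 (new : List (List Int)) : Prop := ∀ x ∈ new, 2 ≤ x.length
instance (new : List (List Int)) : Decidable (Pre_solution_842_3 new) := by unfold Pre_solution_842_3; infer_instance
def pvWitness_solution_842_3 : List (List Int) := [[0, 5], [1, 3]]
def Spec_solution_842_3 (new : List (List Int)) (out : Int) : Prop := out = solution_842_3_alt new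
instance (new : List (List Int)) (out : Int) : Decidable (Spec_solution_842_3 new out) := by unfold Spec_solution_842_3; infer_instance

-- ===== CLAIM (what is proved, stated in full; the proofs are below) =====
def Claim_equal_solution_842_3 : Prop := ∀ (new : List (List Int)), Dom_solution_842_3 new → Pre_solution_842_3 new → Spec_solution_842_3 new (solution_842_3 new)

-- ===== LEMMAS AND PROOFS =====

-- the (start, end) pair a row contributes, and the predicates the two programs count
def pvPair (x : List Int) : Int × Int := (PySem.List.pyGetD x 0 0, PySem.List.pyGetD x 1 0)
def pvKey (p : Int × Int) : Int ×ₗ Int := toLex (p.1, -p.2)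
def pvUncov (P : List (Int × Int)) (p : Int × Int) : Bool :=
  (P.count p == 1) &&
  !(P.any (fun q => decide (q ≠ p) && decide (q.1 ≤ p.1) && decide (p.2 ≤ q.2)))

theorem pv_two_le_count (P : List (Int × Int)) (p : Int × Int) :
    ∀ (i j : Nat) (hi : i < P.length) (hj : j < P.length), i ≠ j → P[i] = p → P[j] = p →
    2 ≤ P.count p := by
  induction P with
  | nil => intro i j hi; simp at hi
  | cons x t ih =>
    intro i j hi hj hne hpi hpj
    match i, j with
    | 0, 0 => omega
    | 0, j+1 =>
      simp only [List.getElem_cons_zero] at hpi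
      simp only [List.getElem_cons_succ] at hpj
      have hm : p ∈ t := hpj ▸ List.getElem_mem _
      have := List.count_pos_iff.mpr hm
      simp [hpi]
      omega
    | i+1, 0 =>
      simp only [List.getElem_cons_zero] at hpj
      simp only [List.getElem_cons_succ] at hpi
      have hm : p ∈ t := hpi ▸ List.getElem_mem _
      have := List.count_pos_iff.mpr hm
      simp [hpj]
      omega
    | i+1, j+1 =>
      simp only [List.getElem_cons_succ] at hpi hpj
      have := ih i j (by simpa using hi) (by simpa using hj) (by omega) hpi hpj
      simp [List.count_cons]
      omega


theorem pv_exists_other_idx (P : List (Int × Int)) (p : Int × Int) :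
    ∀ (k : Nat) (hk : k < P.length), P[k] = p → 2 ≤ P.count p →
    ∃ m, ∃ (hm : m < P.length), m ≠ k ∧ P[m] = p := by
  induction P with
  | nil => intro k hk; simp at hk
  | cons x t ih =>
    intro k hk hpk h2
    match k with
    | 0 =>
      simp only [List.getElem_cons_zero] at hpk
      rw [hpk] at h2
      have h1' : (p :: t).count p = t.count p + 1 := List.count_cons_self
      have hm : p ∈ t := List.count_pos_iff.mp (by omega)
      obtain ⟨m, hm', hpm⟩ := List.mem_iff_getElem.mp hm
      exact ⟨m + 1, by simpa using hm', by omega, by simpa using hpm⟩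
    | k+1 =>
      simp only [List.getElem_cons_succ] at hpk
      by_cases hx : x = p
      · exact ⟨0, by simp, by omega, by simpa using hx⟩
      · have h2' : 2 ≤ t.count p := by simp [hx] at h2 ⊢; omega
        obtain ⟨m, hm, hmk, hpm⟩ := ih k (by simpa using hk) hpk h2'
        exact ⟨m + 1, by simpa using hm, by omega, by simpa using hpm⟩


theorem pv_cond_iff (P : List (Int × Int)) (k : Nat) (hk : k < P.length) :
    (∃ m, ∃ (_ : m < P.length), m ≠ k ∧ P[m].1 ≤ P[k].1 ∧ P[k].2 ≤ P[m].2)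
    ↔ ¬(P.count P[k] = 1 ∧ ∀ q ∈ P, ¬(q ≠ P[k] ∧ q.1 ≤ P[k].1 ∧ P[k].2 ≤ q.2)) := by
  constructor
  · rintro ⟨m, hm, hmk, h1, h2⟩ ⟨hc1, hall⟩
    by_cases hq : P[m] = P[k]
    · have := pv_two_le_count P P[k] m k hm hk hmk hq rfl
      omega
    · exact hall P[m] (List.getElem_mem hm) ⟨hq, h1, h2⟩
  · intro h
    by_cases hc : P.count P[k] = 1
    · push_neg at h
      obtain ⟨q, hqP, hqne, hd1, hd2⟩ := h hc
      obtain ⟨m, hm, hq⟩ := List.mem_iff_getElem.mp hqP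
      refine ⟨m, hm, ?_, by rw [hq]; exact hd1, by rw [hq]; exact hd2⟩
      intro hmk
      subst hmk
      exact hqne hq.symm
    · have hmem : P[k] ∈ P := List.getElem_mem hk
      have h1 : 0 < P.count P[k] := List.count_pos_iff.mpr hmem
      obtain ⟨m, hm, hmk, hpm⟩ := pv_exists_other_idx P P[k] k hk rfl (by omega)
      exact ⟨m, hm, hmk, by rw [hpm], by rw [hpm]⟩


theorem pvUncov_not_iff (P : List (Int × Int)) (p : Int × Int) :
    ((!pvUncov P p) = true) ↔ ¬(P.count p = 1 ∧ ∀ q ∈ P, ¬(q ≠ p ∧ q.1 ≤ p.1 ∧ p.2 ≤ q.2)) := by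
  simp [pvUncov, List.any_eq_true, not_and, -not_and']
  tauto

theorem pvA_eq (new : List (List Int)) :
    solution_842_3 new = ((new.map pvPair).countP (pvUncov (new.map pvPair)) : Int) := by
  simp only [solution_842_3]
  rw [PySem.List.foldl_append_if]
  set P := new.map pvPair with hP
  have hlen : P.length = new.length := by simp [hP]
  have key : ∀ (f : (Int × Int) → Bool),
      P.countP f = (PySem.List.pyRange 0 (new.length : Int) 1).countP
        (fun j => f (PySem.List.pyGetD P j (0, 0))) := by
    intro f
    conv_lhs => rw [← PySem.List.map_pyGetD_pyRange_zero P (0, 0)]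
    rw [List.countP_map]
    have : PySem.List.len P = (new.length : Int) := by
      simp [PySem.List.len_eq, hlen]
    rw [this]
    rfl
  have hcong : (PySem.List.pyRange 0 (new.length : Int) 1).countP
        (fun i => (PySem.List.pyRange 0 (new.length : Int) 1).any (fun j =>
              decide (j ≠ i) &&
              decide (PySem.List.pyGetD (PySem.List.pyGetD new j []) 0 0 ≤
                      PySem.List.pyGetD (PySem.List.pyGetD new i []) 0 0) &&
              decide (PySem.List.pyGetD (PySem.List.pyGetD new i []) 1 0 ≤
                      PySem.List.pyGetD (PySem.List.pyGetD new j []) 1 0)))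
      = (PySem.List.pyRange 0 (new.length : Int) 1).countP
          (fun j => !(pvUncov P (PySem.List.pyGetD P j (0, 0)))) := by
    apply List.countP_congr
    intro i hi
    rw [PySem.List.mem_pyRange_one] at hi
    have hklt : i.toNat < P.length := by omega
    have hPk : PySem.List.pyGetD P i (0, 0) = P[i.toNat] :=
      PySem.List.pyGetD_eq_getElem P (0, 0) (by omega) (by omega)
    have hacc : ∀ (m : Nat) (hm : m < P.length),
        PySem.List.pyGetD (PySem.List.pyGetD new (m : Int) []) 0 0 = P[m].1 ∧
        PySem.List.pyGetD (PySem.List.pyGetD new (m : Int) []) 1 0 = P[m].2 := by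
      intro m hm
      rw [PySem.List.pyGetD_eq_getElem new [] (by omega) (by omega)]
      simp [hP, pvPair]
    rw [hPk, pvUncov_not_iff, ← pv_cond_iff P i.toNat hklt]
    rw [List.any_eq_true]
    constructor
    · rintro ⟨x, hxr, hx⟩
      rw [PySem.List.mem_pyRange_one] at hxr
      simp only [Bool.and_eq_true, decide_eq_true_iff] at hx
      obtain ⟨⟨hxne, h1⟩, h2⟩ := hx
      have hm : x.toNat < P.length := by omega
      have hxx : x = ((x.toNat : Nat) : Int) := by omega
      have hii : i = ((i.toNat : Nat) : Int) := by omega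
      rw [hxx] at h1 h2
      rw [hii] at h1 h2
      rw [(hacc x.toNat hm).1, (hacc i.toNat hklt).1] at h1
      rw [(hacc x.toNat hm).2, (hacc i.toNat hklt).2] at h2
      exact ⟨x.toNat, hm, by omega, h1, h2⟩
    · rintro ⟨m, hm, hmk, h1, h2⟩
      refine ⟨(m : Int), ?_, ?_⟩
      · rw [PySem.List.mem_pyRange_one]
        omega
      · simp only [Bool.and_eq_true, decide_eq_true_iff]
        have hii : i = ((i.toNat : Nat) : Int) := by omega
        rw [hii]
        rw [(hacc m hm).1, (hacc i.toNat hklt).1, (hacc m hm).2, (hacc i.toNat hklt).2]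
        exact ⟨⟨by omega, h1⟩, h2⟩
  simp only [List.nil_append, List.length_map, ← List.countP_eq_length_filter]
  rw [hcong]
  have key' := key (fun p => !pvUncov P p)
  beta_reduce at key'
  rw [← key']
  have hsum : P.countP (pvUncov P) + P.countP (fun a => !pvUncov P a) = P.length := by
    simp [List.length_eq_countP_add_countP (pvUncov P)]
  push_cast
  omega


theorem pv_insertBy_congr {α : Type} (f g : α → α → Bool) (h : ∀ a b, f a b = g a b) (x : α) (l : List α) :
    PySem.List.insertBy f x l = PySem.List.insertBy g x l := by
  induction l with
  | nil => rfl
  | cons y ys ih => simp only [PySem.List.insertBy, h, ih]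

theorem pv_foldl_insertBy_congr {α : Type} (f g : α → α → Bool) (h : ∀ a b, f a b = g a b) (K acc : List α) :
    K.foldl (fun acc x => PySem.List.insertBy f x acc) acc
      = K.foldl (fun acc x => PySem.List.insertBy g x acc) acc := by
  induction K generalizing acc with
  | nil => rfl
  | cons y ys ih => simp only [List.foldl_cons, pv_insertBy_congr f g h]

theorem pv_sorted2_eq (K : List (Int × Int)) :
    PySem.List.sorted2 K (fun p => p.1) (fun p => -p.2) false = PySem.List.sorted K pvKey false := by
  rw [PySem.List.sorted_eq_foldl_insertBy]
  unfold PySem.List.sorted2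
  apply pv_foldl_insertBy_congr
  intro a b
  rw [Bool.eq_iff_iff]
  simp only [Bool.false_eq_true, if_false, Bool.or_eq_true, Bool.and_eq_true, Bool.not_eq_true',
    decide_eq_true_iff, decide_eq_false_iff_not, pvKey, Prod.Lex.lt_iff, ofLex_toLex]
  omega

def pvMaxEnds (l : List (Int × Int)) : Option Int :=
  l.foldl (fun me q => match me with | none => some q.2 | some m => if m < q.2 then some q.2 else some m) none

theorem pv_meLt_foldl (l : List (Int × Int)) (b : Int) :
    ∀ (me : Option Int),
    (match l.foldl (fun me q => match me with | none => some q.2 | some m => if m < q.2 then some q.2 else some m) me with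
      | none => true | some m => decide (m < b)) = true
    ↔ ((match me with | none => true | some m => decide (m < b)) = true ∧ ∀ q ∈ l, q.2 < b) := by
  induction l with
  | nil => intro me; simp
  | cons q t ih =>
    intro me
    rw [List.foldl_cons, ih]
    have hstep : ((match (match me with | none => some q.2 | some m => if m < q.2 then some q.2 else some m) with
        | none => true | some m => decide (m < b)) = true)
        ↔ ((match me with | none => true | some m => decide (m < b)) = true ∧ q.2 < b) := by
      cases me with
      | none => simp
      | some m =>
        by_cases h : m < q.2 <;> simp [h] <;> omega
    rw [hstep]
    simp only [List.mem_cons]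
    constructor
    · rintro ⟨⟨h1, h2⟩, h3⟩
      exact ⟨h1, fun r hr => by rcases hr with rfl | hr; exact h2; exact h3 r hr⟩
    · rintro ⟨h1, h2⟩
      exact ⟨⟨h1, h2 q (Or.inl rfl)⟩, fun r hr => h2 r (Or.inr hr)⟩


theorem pv_head_cond (Pref S' : List (Int × Int)) (p : Int × Int)
    (hpw : (Pref ++ p :: S').Pairwise (fun a b => pvKey a < pvKey b)) :
    ((∀ q ∈ Pref ++ p :: S', pvKey q < pvKey p → q.2 < p.2) ↔ (∀ q ∈ Pref, q.2 < p.2)) := by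
  rw [List.pairwise_append] at hpw
  obtain ⟨h1, h2, h3⟩ := hpw
  rw [List.pairwise_cons] at h2
  constructor
  · intro h q hq
    exact h q (List.mem_append_left _ hq) (h3 q hq p (List.mem_cons_self))
  · intro h q hq hlt
    rcases List.mem_append.mp hq with hq | hq
    · exact h q hq
    · rcases List.mem_cons.mp hq with rfl | hq
      · exact absurd hlt (lt_irrefl _)
      · exact absurd hlt (not_lt_of_gt (h2.1 q hq))

theorem pv_sweep (cnt : PySem.Dict (Int × Int) Int) (Full : List (Int × Int))
    (hpw : Full.Pairwise (fun a b => pvKey a < pvKey b)) :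
    ∀ (S Pref : List (Int × Int)) (u : Int), Full = Pref ++ S →
    (S.foldl (pvStep cnt) (u, pvMaxEnds Pref)).1
      = u + ((S.countP (fun p => (cnt.getD p 0 == 1) &&
              decide (∀ q ∈ Full, pvKey q < pvKey p → q.2 < p.2)) : Nat) : Int) := by
  intro S
  induction S with
  | nil => intro Pref u _; simp
  | cons p S' ih =>
    intro Pref u hfull
    rw [List.foldl_cons]
    have hme : (pvStep cnt (u, pvMaxEnds Pref) p).2 = pvMaxEnds (Pref ++ [p]) := by
      simp [pvStep, pvMaxEnds, List.foldl_append]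
    have hcondeq : ((match pvMaxEnds Pref with | none => true | some m => decide (m < p.2)) = true)
        ↔ (∀ q ∈ Full, pvKey q < pvKey p → q.2 < p.2) := by
      rw [hfull, pv_head_cond Pref S' p (hfull ▸ hpw)]
      have := pv_meLt_foldl Pref p.2 none
      simp only [pvMaxEnds]
      rw [this]
      simp
    have hbool : ((cnt.getD p 0 == 1) &&
          (match pvMaxEnds Pref with | none => true | some m => decide (m < p.2)))
        = ((cnt.getD p 0 == 1) && decide (∀ q ∈ Full, pvKey q < pvKey p → q.2 < p.2)) := by
      rw [Bool.eq_iff_iff]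
      simp only [Bool.and_eq_true, decide_eq_true_iff]
      rw [hcondeq]
    have hst : pvStep cnt (u, pvMaxEnds Pref) p
        = ((if (cnt.getD p 0 == 1) &&
              decide (∀ q ∈ Full, pvKey q < pvKey p → q.2 < p.2) then u + 1 else u),
           pvMaxEnds (Pref ++ [p])) := by
      rw [← hme]
      simp only [pvStep]
      rw [hbool]
    rw [hst]
    rw [ih (Pref ++ [p]) _ (by rw [hfull]; simp)]
    rw [List.countP_cons]
    have : (decide (∀ q ∈ Full, pvKey q < pvKey p → q.2 < p.2)) = true ↔
        (∀ q ∈ Full, pvKey q < pvKey p → q.2 < p.2) := by simp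
    by_cases hc : ((cnt.getD p 0 == 1) && decide (∀ q ∈ Full, pvKey q < pvKey p → q.2 < p.2)) = true
    · simp only [hc, if_true]
      push_cast
      ring
    · rw [if_neg hc, if_neg hc]
      push_cast
      ring


theorem pv_countP_ofList : ∀ (P : List (Int × Int)) (f : (Int × Int) → Bool),
    (∀ p ∈ P, f p = true → P.count p = 1) →
    (PySem.Set.ofList P).countP f = P.countP f := by
  intro P
  induction P with
  | nil => intro f _; rfl
  | cons x t ih =>
    intro f h
    have ht : ∀ p ∈ t, f p = true → t.count p = 1 := by
      intro p hp hf
      have h1 := h p (List.mem_cons_of_mem x hp) hf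
      have h2 : 0 < t.count p := List.count_pos_iff.mpr hp
      rw [List.count_cons] at h1
      omega
    rw [PySem.Set.ofList_cons]
    by_cases hx : f x = true
    · have hx1 := h x List.mem_cons_self hx
      rw [List.count_cons_self] at hx1
      have hxt : x ∉ t := by
        intro hmem
        have := List.count_pos_iff.mpr hmem
        omega
      have hdisc : (PySem.Set.ofList t).discard x = PySem.Set.ofList t := by
        apply List.filter_eq_self.mpr
        intro y hy
        have : y ∈ t := (PySem.Set.mem_ofList t y).mp hy
        simp only [Bool.not_eq_true', beq_eq_false_iff_ne, ne_eq]
        exact fun hyx => hxt (hyx ▸ this)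
      rw [show PySem.Set.discard (PySem.Set.ofList t) x = (PySem.Set.ofList t).discard x from rfl] at hdisc ⊢
      rw [hdisc]
      simp only [List.countP_cons, hx, if_pos]
      rw [ih f ht]
    · simp only [List.countP_cons, hx]
      have hdisc : List.countP f ((PySem.Set.ofList t).discard x) = List.countP f (PySem.Set.ofList t) := by
        show List.countP f (List.filter (fun y => !y == x) (PySem.Set.ofList t)) = _
        rw [List.countP_filter]
        apply List.countP_congr
        intro y hy
        by_cases hfy : f y = true
        · have hyx : y ≠ x := fun hyx => (by rw [hyx] at hfy; exact absurd hfy (by simp [hx]))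
          simp [hfy, hyx]
        · simp [Bool.eq_false_iff.mpr hfy]
      rw [hdisc, ih f ht]


theorem pv_val_iff (P S : List (Int × Int)) (hmem : ∀ q, q ∈ S ↔ q ∈ P) (p : Int × Int) :
    (∀ q ∈ S, pvKey q < pvKey p → q.2 < p.2) ↔ (∀ q ∈ P, ¬(q ≠ p ∧ q.1 ≤ p.1 ∧ p.2 ≤ q.2)) := by
  constructor
  · intro h q hq hcon
    obtain ⟨hne, h1, h2⟩ := hcon
    have hlt : pvKey q < pvKey p := by
      simp only [pvKey, Prod.Lex.lt_iff, ofLex_toLex]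
      have : q.1 ≠ p.1 ∨ q.2 ≠ p.2 := by
        by_contra hcc
        push_neg at hcc
        exact hne (Prod.ext hcc.1 hcc.2)
      omega
    have := h q ((hmem q).mpr hq) hlt
    omega
  · intro h q hq hlt
    by_contra hcon
    push_neg at hcon
    simp only [pvKey, Prod.Lex.lt_iff, ofLex_toLex] at hlt
    refine h q ((hmem q).mp hq) ⟨?_, by omega, by omega⟩
    intro he
    rw [he] at hlt
    omega

theorem pvB_eq (new : List (List Int)) :
    solution_842_3_alt new = ((new.map pvPair).countP (pvUncov (new.map pvPair)) : Int) := by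
  simp only [solution_842_3_alt]
  set P := new.map pvPair with hP
  have hcnt : new.foldl (fun d x =>
      let p := (PySem.List.pyGetD x 0 0, PySem.List.pyGetD x 1 0)
      d.insert p (d.getD p 0 + 1)) PySem.Dict.empty = PySem.Dict.counter P := by
    rw [← PySem.Dict.foldl_insert_getD_add_one_eq_counter P, hP, List.foldl_map]
    rfl
  rw [hcnt, PySem.Dict.keys_counter, pv_sorted2_eq]
  set K := PySem.Set.ofList P with hK
  set S := PySem.List.sorted K pvKey false with hS
  have hperm : S.Perm K := PySem.List.sorted_perm K pvKey false
  have hnodupS : S.Nodup := hperm.nodup_iff.mpr (hK ▸ PySem.Set.nodup_ofList P)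
  have hkeyinj : ∀ a b : Int × Int, pvKey a = pvKey b → a = b := by
    intro a b h
    have h' := congrArg ofLex h
    simp only [pvKey, ofLex_toLex, Prod.mk.injEq] at h'
    exact Prod.ext h'.1 (by omega)
  have hpw : S.Pairwise (fun a b => pvKey a < pvKey b) := by
    have hle : S.Pairwise (fun a b => pvKey a ≤ pvKey b) := PySem.List.sorted_pairwise K pvKey
    have := List.Pairwise.and hle hnodupS
    exact this.imp (fun {a b} h => lt_of_le_of_ne h.1 (fun he => h.2 (hkeyinj a b he)))
  have hmemSP : ∀ q : Int × Int, q ∈ S ↔ q ∈ P := by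
    intro q
    rw [PySem.List.mem_sorted, hK, PySem.Set.mem_ofList]
  have hfold := pv_sweep (PySem.Dict.counter P) S hpw S [] 0 rfl
  have hnil : pvMaxEnds [] = none := rfl
  rw [hnil] at hfold
  rw [hfold]
  have hstep1 : S.countP (fun p => ((PySem.Dict.counter P).getD p 0 == 1) &&
        decide (∀ q ∈ S, pvKey q < pvKey p → q.2 < p.2))
      = S.countP (pvUncov P) := by
    apply List.countP_congr
    intro p _
    simp only [Bool.and_eq_true, pvUncov]
    apply and_congr
    · rw [PySem.Dict.getD_counter]
      simp only [beq_iff_eq]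
      constructor
      · intro h; exact_mod_cast h
      · intro h; exact_mod_cast h
    · rw [decide_eq_true_iff, pv_val_iff P S hmemSP p]
      simp only [Bool.not_eq_true', List.any_eq_false, Bool.and_eq_true, decide_eq_true_iff, not_and]
      constructor
      · intro h q hq
        have := h q hq
        tauto
      · intro h q hq
        have := h q hq
        tauto
  rw [hstep1]
  have hstep2 : List.countP (pvUncov P) S = List.countP (pvUncov P) K := List.Perm.countP_eq _ hperm
  have hstep3 : List.countP (pvUncov P) K = List.countP (pvUncov P) P := by
    rw [hK]
    apply pv_countP_ofList
    intro p _ hf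
    simp only [pvUncov, Bool.and_eq_true, beq_iff_eq] at hf
    exact hf.1
  rw [hstep2, hstep3]
  omega


-- ===== VERDICT (by name: the statement is the Claim_ definition above) =====
theorem solution_842_3_spec : Claim_equal_solution_842_3 := by
  intro new _ _
  unfold Spec_solution_842_3
  rw [pvA_eq, pvB_eq]
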